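-- pv_equiv track=rewrite | github.com/chainer/chainer-test | cuda_matrix_generator.py | _get_fully_qualified_version_id
-- ===== SOURCE A (Python) =====
-- def _get_fully_qualified_version_id(cuda, libver, matrix):
--     if cuda == 'none':
--         if libver != 'none':
--             raise RuntimeError('library version must be none if cuda is none')
--         return libver
--     elif cuda not in matrix.keys():
--         raise RuntimeError(
--             'unsupported cuda version: '
--             'must be any of: {}'.format(matrix.keys()))
--
--     for fq_libver in sorted(matrix[cuda]):
--         if libver == fq_libver or fq_libver.startswith('{}-'.format(libver)):
--             return fq_libver
--
--     raise RuntimeError('unsupported library version: {}'.format(libver))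
-- ===== SOURCE B (Python) =====
-- def _get_fully_qualified_version_id(cuda, libver, matrix):
--     if cuda == 'none':
--         if libver != 'none':
--             raise RuntimeError('library version must be none if cuda is none')
--         return libver
--     versions = matrix.get(cuda)
--     if versions is None:
--         raise RuntimeError(
--             'unsupported cuda version: '
--             'must be any of: {}'.format(matrix.keys()))
--     prefix = libver + '-'
--     best = None
--     for v in versions:
--         if (v == libver or v.startswith(prefix)) and (best is None or v < best):
--             best = v
--     if best is None:
--         raise RuntimeError('unsupported library version: {}'.format(libver))
--     return best
-- ===== Notes on version B (the rewrite author's own statement) =====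
-- stated objective: alternative
-- what changed: Replaces sorting the whole version list and scanning the sorted copy for the first match with a single running-minimum pass over the unsorted list (an Option accumulator keeps the smallest matching version seen so far; the first match in sorted order is exactly that minimum), and the key-membership test becomes a single dict .get() lookup.
import Mathlib
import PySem

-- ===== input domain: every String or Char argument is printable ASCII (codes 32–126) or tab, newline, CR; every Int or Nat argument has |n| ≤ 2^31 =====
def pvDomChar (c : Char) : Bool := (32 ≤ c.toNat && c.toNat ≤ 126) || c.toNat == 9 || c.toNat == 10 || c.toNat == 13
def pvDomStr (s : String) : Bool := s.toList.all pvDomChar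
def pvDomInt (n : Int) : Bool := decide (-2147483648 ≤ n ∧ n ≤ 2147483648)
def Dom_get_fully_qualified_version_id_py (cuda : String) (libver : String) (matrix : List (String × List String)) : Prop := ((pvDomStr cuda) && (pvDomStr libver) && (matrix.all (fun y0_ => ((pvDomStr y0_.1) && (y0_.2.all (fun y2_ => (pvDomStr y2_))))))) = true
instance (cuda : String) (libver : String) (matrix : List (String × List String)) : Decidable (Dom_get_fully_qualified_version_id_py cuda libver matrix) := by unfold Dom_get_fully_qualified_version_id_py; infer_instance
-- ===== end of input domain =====

-- B replaces A's sort-then-scan-for-first-match by one running-minimum pass with an Option accumulator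
-- (alternative decomposition, same result); where A raises (the three RuntimeErrors) B raises the same
-- errors — those inputs are excluded by Pre_.

-- ===== PORT A =====
-- 'libver == fq_libver or fq_libver.startswith('{}-'.format(libver))'
def pvMatchA (libver fq : String) : Bool :=
  libver == fq || PySem.Chars.startswith fq.toList (libver.toList ++ ['-'])

-- the 'for fq_libver in sorted(matrix[cuda]): if …: return fq_libver' loop; "" stands for the final RuntimeError (outside Pre_)
def pvLoopA (libver : String) : List String → String
  | [] => ""
  | fq :: rest => if pvMatchA libver fq then fq else pvLoopA libver rest

def get_fully_qualified_version_id_py (cuda : String) (libver : String) (matrix : List (String × List String)) : String :=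
  if cuda == "none" then
    (if libver != "none" then "" else libver)   -- "" = RuntimeError, outside Pre_
  else if !((PySem.Dict.mk matrix).contains cuda) then ""   -- RuntimeError, outside Pre_
  else pvLoopA libver (PySem.List.sorted (((PySem.Dict.mk matrix).get? cuda).getD []) (fun v => v) false)

-- ===== PORT B =====
-- loop body: '(v == libver or v.startswith(prefix)) and (best is None or v < best)' updates best
def pvStepB (libver : String) (best : Option String) (v : String) : Option String :=
  if (v == libver || PySem.Chars.startswith v.toList (libver.toList ++ ['-']))
      && (match best with | none => true | some b => decide (v < b)) then
    some v
  else best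

def get_fully_qualified_version_id_py_alt (cuda : String) (libver : String) (matrix : List (String × List String)) : String :=
  if cuda == "none" then
    (if libver != "none" then "" else libver)   -- "" = RuntimeError, outside Pre_
  else
    match (PySem.Dict.mk matrix).get? cuda with
    | none => ""   -- versions is None: RuntimeError, outside Pre_
    | some versions =>
      match versions.foldl (pvStepB libver) none with
      | none => ""   -- best is None: RuntimeError, outside Pre_
      | some best => best

-- ===== PRECONDITION & SPEC =====
-- Pre_ excludes exactly the inputs on which A raises one of its three RuntimeErrors
-- (cuda 'none' with libver not 'none'; cuda not a key of matrix; no matching library version).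
def Pre_get_fully_qualified_version_id_py (cuda : String) (libver : String) (matrix : List (String × List String)) : Prop :=
  if cuda = "none" then libver = "none"
  else (PySem.Dict.mk matrix).contains cuda = true ∧
       ∃ v ∈ ((PySem.Dict.mk matrix).get? cuda).getD [], pvMatchA libver v = true

instance (cuda : String) (libver : String) (matrix : List (String × List String)) : Decidable (Pre_get_fully_qualified_version_id_py cuda libver matrix) := by unfold Pre_get_fully_qualified_version_id_py; infer_instance

def pvWitness_get_fully_qualified_version_id_py : String × String × (List (String × List String)) :=
  ("8.0", "cudnn6", [("8.0", ["cudnn6-2", "cudnn5-1"]), ("9.0", [])])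

def Spec_get_fully_qualified_version_id_py (cuda : String) (libver : String) (matrix : List (String × List String)) (out : String) : Prop := out = get_fully_qualified_version_id_py_alt cuda libver matrix
instance (cuda : String) (libver : String) (matrix : List (String × List String)) (out : String) : Decidable (Spec_get_fully_qualified_version_id_py cuda libver matrix out) := by unfold Spec_get_fully_qualified_version_id_py; infer_instance

-- ===== CLAIM (what is proved, stated in full; the proofs are below) =====
def Claim_equal_get_fully_qualified_version_id_py : Prop := ∀ (cuda : String) (libver : String) (matrix : List (String × List String)), Dom_get_fully_qualified_version_id_py cuda libver matrix → Pre_get_fully_qualified_version_id_py cuda libver matrix → Spec_get_fully_qualified_version_id_py cuda libver matrix (get_fully_qualified_version_id_py cuda libver matrix)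

-- ===== LEMMAS AND PROOFS =====

-- B's loop test is A's match predicate
theorem pvStepB_match (libver v : String) (best : Option String) :
    pvStepB libver best v =
      if pvMatchA libver v && (match best with | none => true | some b => decide (v < b)) then some v else best := by
  simp [pvStepB, pvMatchA, Bool.beq_comm]

-- A's loop over a list is the head of the filtered list
theorem pvLoopA_eq_headD (libver : String) (l : List String) :
    pvLoopA libver l = (l.filter (pvMatchA libver)).headD "" := by
  induction l with
  | nil => rfl
  | cons x xs ih =>
    by_cases h : pvMatchA libver x = true
    · simp [pvLoopA, h]
    · simp [pvLoopA, h, ih]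

-- B's running-minimum fold computes the minimum of the accumulator and the matching elements
theorem pvFoldB_eq_min? (libver : String) (l : List String) (b : Option String) :
    l.foldl (pvStepB libver) b =
      PySem.List.min? (b.toList ++ l.filter (pvMatchA libver)) (fun y => y) := by
  induction l generalizing b with
  | nil =>
    cases b with
    | none => rfl
    | some m => simp [PySem.List.min?_id_cons]
  | cons x xs ih =>
    rw [List.foldl_cons, ih]
    by_cases hp : pvMatchA libver x = true
    · cases b with
      | none => simp [pvStepB_match, hp]
      | some m =>
        by_cases hlt : x < m
        · simp [pvStepB_match, hp, hlt, PySem.List.min?_id_cons,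
            min_eq_right (le_of_lt hlt)]
        · simp [pvStepB_match, hp, hlt, PySem.List.min?_id_cons,
            min_eq_left (le_of_not_gt hlt)]
    · simp [pvStepB_match, hp]

-- first match in sorted order = minimum of the matches
theorem pv_sorted_first_eq_min (p : String → Bool) (vs : List String)
    (hex : ∃ v ∈ vs, p v = true) :
    ((PySem.List.sorted vs (fun v => v) false).filter p).headD "" =
      (match PySem.List.min? (vs.filter p) (fun v => v) with
       | none => ""
       | some m => m) := by
  have hperm : ((PySem.List.sorted vs (fun v => v) false).filter p).Perm (vs.filter p) :=
    (PySem.List.sorted_perm vs (fun v => v) false).filter p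
  obtain ⟨v, hv, hpv⟩ := hex
  have hne : vs.filter p ≠ [] := by
    intro h
    have := List.mem_filter.mpr ⟨hv, hpv⟩
    simp [h] at this
  cases hmin : PySem.List.min? (vs.filter p) (fun v => v) with
  | none => exact absurd ((PySem.List.min?_eq_none_iff _ _).mp hmin) hne
  | some m =>
    cases hsf : (PySem.List.sorted vs (fun v => v) false).filter p with
    | nil =>
      exact absurd (List.Perm.eq_nil (hperm.symm.trans (hsf ▸ List.Perm.refl _))) hne
    | cons h t =>
      simp only [List.headD_cons]
      have hpw : (h :: t).Pairwise (fun a b : String => a ≤ b) := by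
        rw [← hsf]
        exact (PySem.List.sorted_pairwise vs (fun v => v)).filter p
      have hmem_m : m ∈ h :: t := by
        rw [← hsf]
        exact hperm.symm.subset (PySem.List.min?_mem hmin)
      have h_le_m : h ≤ m := by
        rcases List.mem_cons.mp hmem_m with rfl | hm
        · exact le_refl m
        · exact (List.pairwise_cons.mp hpw).1 m hm
      have hmem_h : h ∈ vs.filter p := hperm.subset (by rw [hsf]; exact List.mem_cons_self)
      have m_le_h : m ≤ h := PySem.List.min?_isMin hmin h hmem_h
      exact le_antisymm h_le_m m_le_h

-- ===== VERDICT (by name: the statement is the Claim_ definition above) =====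
theorem get_fully_qualified_version_id_py_spec : Claim_equal_get_fully_qualified_version_id_py := by
  intro cuda libver matrix _ hpre
  unfold Spec_get_fully_qualified_version_id_py
  unfold get_fully_qualified_version_id_py get_fully_qualified_version_id_py_alt
  unfold Pre_get_fully_qualified_version_id_py at hpre
  by_cases hc : cuda = "none"
  · simp [hc]
  · simp only [hc, if_false, beq_iff_eq] at hpre ⊢
    obtain ⟨hcont, v, hv, hpv⟩ := hpre
    cases hget : (PySem.Dict.mk matrix).get? cuda with
    | none =>
      exfalso
      simp only [PySem.Dict.contains, List.any_eq_true] at hcont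
      obtain ⟨p, hpmem, hpk⟩ := hcont
      rw [PySem.Dict.get?, Option.map_eq_none_iff, List.find?_eq_none] at hget
      exact absurd hpk (hget p hpmem)
    | some versions =>
      rw [hget] at hv
      simp only [Option.getD_some] at hv
      simp only [hcont, Bool.not_true, Option.getD_some, if_neg (by simp : ¬ (false = true))]
      rw [pvLoopA_eq_headD, pvFoldB_eq_min?]
      simp only [Option.toList_none, List.nil_append]
      exact pv_sorted_first_eq_min (pvMatchA libver) versions ⟨v, hv, hpv⟩
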